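-- pv_equiv track=rewrite | github.com/kdar/challenges | hackerrank/challenges/Functional Programming/Recursion/python3/sequence_full_of_colors.py | full_of_colors
-- ===== SOURCE A (Python) =====
-- def full_of_colors(seq):
--   r = 0
--   g = 0
--   y = 0
--   b = 0
--
--   for i in seq:
--     if i == "R":
--       r+=1
--     elif i == "G":
--       g+=1
--     elif i == "Y":
--       y+=1
--     elif i == "B":
--       b+=1
--
--     if abs(r-g) > 1 or abs(y-b) > 1:
--       return False
--
--   return r-g == 0 and y-b == 0
-- ===== SOURCE B (Python) =====
-- def full_of_colors(seq):
--     def valid(s, plus, minus):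
--         bal = 0
--         for c in s:
--             bal += (c == plus) - (c == minus)
--             if abs(bal) > 1:
--                 return False
--         return bal == 0
--     return valid(seq, 'R', 'G') and valid(seq, 'Y', 'B')
-- ===== Notes on version B (the rewrite author's own statement) =====
-- stated objective: simpler
-- what changed: Replaces the interleaved four-counter pass with two independent single-balance passes (one helper run for R/G, one for Y/B), each keeping one signed running balance.
import Mathlib
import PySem

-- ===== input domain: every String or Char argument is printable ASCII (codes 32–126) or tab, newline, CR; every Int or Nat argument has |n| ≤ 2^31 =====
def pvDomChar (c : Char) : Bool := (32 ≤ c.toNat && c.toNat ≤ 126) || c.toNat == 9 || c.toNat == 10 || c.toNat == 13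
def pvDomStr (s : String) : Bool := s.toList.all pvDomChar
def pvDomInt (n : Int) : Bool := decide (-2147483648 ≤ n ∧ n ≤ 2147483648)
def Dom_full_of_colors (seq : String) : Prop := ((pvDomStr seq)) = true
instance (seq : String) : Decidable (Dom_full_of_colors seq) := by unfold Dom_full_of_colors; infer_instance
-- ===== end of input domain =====

-- B replaces A's interleaved four-counter pass with two independent single-balance passes (simpler decomposition, same cost).


-- ===== PORT A =====
-- A's loop: four counters, elif chain, early False when |r-g|>1 or |y-b|>1
def focLoop : List Char → Int → Int → Int → Int → Bool
  | [], r, g, y, b => decide (r - g = 0) && decide (y - b = 0)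
  | c :: t, r, g, y, b =>
    match (if c = 'R' then (r + 1, g, y, b)
           else if c = 'G' then (r, g + 1, y, b)
           else if c = 'Y' then (r, g, y + 1, b)
           else if c = 'B' then (r, g, y, b + 1)
           else (r, g, y, b) : Int × Int × Int × Int) with
    | (r, g, y, b) =>
      if 1 < |r - g| ∨ 1 < |y - b| then false
      else focLoop t r g y b

def full_of_colors (seq : String) : Bool := focLoop seq.toList 0 0 0 0

-- ===== PORT B =====
-- B's helper: one signed running balance for the pair (plus, minus), early False when |bal|>1
def focValid : List Char → Char → Char → Int → Bool
  | [], _, _, bal => decide (bal = 0)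
  | c :: t, p, m, bal =>
    let bal := bal + (if c = p then (1 : Int) else 0) - (if c = m then (1 : Int) else 0)
    if 1 < |bal| then false
    else focValid t p m bal

def full_of_colors_alt (seq : String) : Bool :=
  focValid seq.toList 'R' 'G' 0 && focValid seq.toList 'Y' 'B' 0

-- ===== PRECONDITION & SPEC =====
def Spec_full_of_colors (seq : String) (out : Bool) : Prop := out = full_of_colors_alt seq
instance (seq : String) (out : Bool) : Decidable (Spec_full_of_colors seq out) := by unfold Spec_full_of_colors; infer_instance

-- ===== CLAIM (what is proved, stated in full; the proofs are below) =====
def Claim_equal_full_of_colors : Prop := ∀ (seq : String), Dom_full_of_colors seq → Spec_full_of_colors seq (full_of_colors seq)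

-- ===== LEMMAS AND PROOFS =====
theorem focLoop_eq_valid (l : List Char) : ∀ (r g y b : Int),
    focLoop l r g y b = (focValid l 'R' 'G' (r - g) && focValid l 'Y' 'B' (y - b)) := by
  induction l with
  | nil => intro r g y b; simp [focLoop, focValid]
  | cons c t ih =>
    intro r g y b
    by_cases hR : c = 'R'
    · subst hR
      simp only [focLoop, focValid, Char.reduceEq, reduceIte, sub_zero, add_zero]
      rw [show r - g + 1 = r + 1 - g from by ring]
      split_ifs with h h1 h2 h1 h2 <;> simp_all
    · by_cases hG : c = 'G'
      · subst hG
        simp only [focLoop, focValid, Char.reduceEq, reduceIte, sub_zero, add_zero]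
        rw [show r - g - 1 = r - (g + 1) from by ring]
        split_ifs with h h1 h2 h1 h2 <;> simp_all
      · by_cases hY : c = 'Y'
        · subst hY
          simp only [focLoop, focValid, Char.reduceEq, reduceIte,
            sub_zero, add_zero]
          rw [show y - b + 1 = y + 1 - b from by ring]
          split_ifs with h h1 h2 h1 h2 <;> simp_all
        · by_cases hB : c = 'B'
          · subst hB
            simp only [focLoop, focValid, Char.reduceEq,
              reduceIte, sub_zero, add_zero]
            rw [show y - b - 1 = y - (b + 1) from by ring]
            split_ifs with h h1 h2 h1 h2 <;> simp_all
          · simp only [focLoop, focValid, if_neg hR, if_neg hG, if_neg hY, if_neg hB,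
              sub_zero, add_zero]
            split_ifs with h h1 h2 h1 h2 <;> simp_all

-- ===== VERDICT (by name: the statement is the Claim_ definition above) =====
theorem full_of_colors_spec : Claim_equal_full_of_colors := by
  intro seq _
  unfold Spec_full_of_colors full_of_colors full_of_colors_alt
  have h := focLoop_eq_valid seq.toList 0 0 0 0
  simpa using h
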